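-- pv_equiv track=rewrite | github.com/jonathantsang/CompetitiveProgramming | binarysearchio/contest11/1.py | solve
-- ===== SOURCE A (Python) =====
-- from collections import Counter
--
-- def solve(s, t):
--     chars = Counter(s)
--     amt = 0
--     for c in t:
--         if c in chars and chars[c] >= 1:
--             chars[c] -= 1
--         else:
--             amt += 1
--     return amt
-- ===== SOURCE B (Python) =====
-- def solve(s, t):
--     a = sorted(s)
--     b = sorted(t)
--     matched = 0
--     i = 0
--     for c in b:
--         while i < len(a) and a[i] < c:
--             i += 1
--         if i < len(a) and a[i] == c:
--             matched += 1
--             i += 1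
--     return len(t) - matched
-- ===== Notes on version B (the rewrite author's own statement) =====
-- stated objective: alternative
-- what changed: Replaces A's Counter-of-s budget loop over t with sort-then-merge: sort both strings and run a two-pointer sweep counting the matchable characters, returning len(t) minus that match count; no frequency table is built at all.
import Mathlib
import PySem

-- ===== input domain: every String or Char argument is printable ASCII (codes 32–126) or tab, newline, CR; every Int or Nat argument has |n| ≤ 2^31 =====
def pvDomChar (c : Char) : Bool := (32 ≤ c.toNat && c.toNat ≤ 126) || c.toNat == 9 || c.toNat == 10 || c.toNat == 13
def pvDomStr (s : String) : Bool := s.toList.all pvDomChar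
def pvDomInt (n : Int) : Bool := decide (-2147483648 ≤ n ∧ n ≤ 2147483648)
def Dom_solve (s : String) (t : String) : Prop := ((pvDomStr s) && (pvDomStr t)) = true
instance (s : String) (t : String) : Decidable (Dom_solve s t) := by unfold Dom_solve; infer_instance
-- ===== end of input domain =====

-- B replaces A's Counter-of-s budget loop over t by sort-then-merge: sort both
-- strings, count matchable characters with a two-pointer sweep, return
-- len(t) - matched (a different algorithm of similar cost; no frequency table).

-- ===== PORT A =====
def solve (s : String) (t : String) : Int :=
  let chars := PySem.Dict.counter s.toList
  let res := t.toList.foldl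
    (fun (st : PySem.Dict Char Int × Int) c =>
      if st.1.contains c = true ∧ 1 ≤ st.1.getD c 0 then
        (st.1.modify c 0 (· - 1), st.2)
      else
        (st.1, st.2 + 1))
    (chars, 0)
  res.2

-- ===== PORT B =====
-- Python's inner `while i < len(a) and a[i] < c: i += 1` advances the pointer
-- past the elements < c; the pointer position i into the sorted list a is
-- represented by the remaining suffix a[i:].
def pvSkipLt (c : Char) : List Char → List Char
  | [] => []
  | x :: xs => if x < c then pvSkipLt c xs else x :: xs

def pvStep (st : List Char × Int) (c : Char) : List Char × Int :=
  match pvSkipLt c st.1 with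
  | x :: xs => if x = c then (xs, st.2 + 1) else (x :: xs, st.2)
  | [] => ([], st.2)

def solve_alt (s : String) (t : String) : Int :=
  let a := PySem.List.sorted s.toList (fun x => x) false
  let b := PySem.List.sorted t.toList (fun x => x) false
  let res := b.foldl pvStep (a, 0)
  (PySem.Str.len t : Int) - res.2

-- ===== PRECONDITION & SPEC =====
def Spec_solve (s : String) (t : String) (out : Int) : Prop := out = solve_alt s t
instance (s : String) (t : String) (out : Int) : Decidable (Spec_solve s t out) := by unfold Spec_solve; infer_instance

-- ===== CLAIM (what is proved, stated in full; the proofs are below) =====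
def Claim_equal_solve : Prop := ∀ (s : String) (t : String), Dom_solve s t → Spec_solve s t (solve s t)

-- ===== LEMMAS AND PROOFS =====

-- A's loop, characterised: starting from any nonnegative budget dict d,
-- the final miss counter is amt plus the sum of the positive residues.
theorem pv_loopA (l : List Char) : ∀ (d : PySem.Dict Char Int) (amt : Int),
    (∀ c, 0 ≤ d.getD c 0) →
    (l.foldl
      (fun (st : PySem.Dict Char Int × Int) c =>
        if st.1.contains c = true ∧ 1 ≤ st.1.getD c 0 then
          (st.1.modify c 0 (· - 1), st.2)
        else
          (st.1, st.2 + 1))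
      (d, amt)).2
      = amt + ∑ c ∈ l.toFinset, max 0 ((l.count c : Int) - d.getD c 0) := by
  induction l with
  | nil => intro d amt _; simp
  | cons c tl ih =>
    intro d amt hd
    simp only [List.foldl_cons]
    by_cases h : d.contains c = true ∧ 1 ≤ d.getD c 0
    · rw [if_pos h]
      have hd' : ∀ x, 0 ≤ (d.modify c 0 (· - 1)).getD x 0 := by
        intro x
        rw [PySem.Dict.getD_modify]
        by_cases hx : x = c
        · subst hx
          rw [if_pos rfl]
          have := h.2
          omega
        · rw [if_neg hx]
          exact hd x
      rw [ih _ _ hd']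
      congr 1
      have hset : (c :: tl).toFinset = insert c tl.toFinset := by simp
      rw [hset]
      by_cases hc : c ∈ tl.toFinset
      · rw [Finset.insert_eq_self.mpr hc]
        apply Finset.sum_congr rfl
        intro x hx
        rw [PySem.Dict.getD_modify]
        by_cases hxc : x = c
        · subst hxc
          simp only [List.count_cons_self]
          congr 1
          push_cast
          ring
        · rw [if_neg hxc, List.count_cons_of_ne (fun hh => hxc hh.symm)]
      · rw [Finset.sum_insert_of_eq_zero_if_notMem
              (f := fun x => max 0 (((c :: tl).count x : Int) - d.getD x 0))]
        · apply Finset.sum_congr rfl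
          intro x hx
          have hxc : ¬ x = c := fun hh => hc (hh ▸ hx)
          rw [PySem.Dict.getD_modify, if_neg hxc,
              List.count_cons_of_ne (fun hh => hxc hh.symm)]
        · intro _
          have h0 : (tl.count c : Int) = 0 := by
            simp [List.count_eq_zero_of_not_mem (by simpa using hc)]
          rw [List.count_cons_self]
          push_cast
          have := h.2
          omega
    · rw [if_neg h]
      rw [ih _ _ hd]
      have hzero : d.getD c 0 = 0 := by
        by_cases hc : d.contains c = true
        · have h1 := hd c
          have h2 : ¬ (1 ≤ d.getD c 0) := fun hh => h ⟨hc, hh⟩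
          omega
        · exact PySem.Dict.getD_of_not_contains d 0 (by simpa using hc)
      have hset : (c :: tl).toFinset = insert c tl.toFinset := by simp
      rw [hset]
      have hsum : ∑ x ∈ insert c tl.toFinset,
            max 0 (((c :: tl).count x : Int) - d.getD x 0)
          = ∑ x ∈ insert c tl.toFinset,
            (max 0 ((tl.count x : Int) - d.getD x 0) + if x = c then 1 else 0) := by
        apply Finset.sum_congr rfl
        intro x hx
        by_cases hxc : x = c
        · subst hxc
          rw [if_pos rfl, hzero, List.count_cons_self]
          have hn0 : (0:Int) ≤ (tl.count x : Int) := Int.natCast_nonneg _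
          push_cast
          omega
        · rw [if_neg hxc, List.count_cons_of_ne (fun hh => hxc hh.symm)]
          ring
      rw [hsum, Finset.sum_add_distrib, Finset.sum_ite_eq' (insert c tl.toFinset) c (fun _ => (1:Int)),
          if_pos (Finset.mem_insert_self c tl.toFinset)]
      by_cases hc : c ∈ tl.toFinset
      · rw [Finset.insert_eq_self.mpr hc]; ring
      · rw [Finset.sum_insert_of_eq_zero_if_notMem
              (f := fun x => max 0 ((tl.count x : Int) - d.getD x 0))]
        · ring
        · intro _
          have h0 : (tl.count c : Int) = 0 := by
            simp [List.count_eq_zero_of_not_mem (by simpa using hc)]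
          rw [h0, hzero]
          simp

-- pvSkipLt facts
theorem pv_skipLt_sorted (c : Char) (a : List Char) (h : a.Pairwise (· ≤ ·)) :
    (pvSkipLt c a).Pairwise (· ≤ ·) := by
  induction a with
  | nil => simp [pvSkipLt]
  | cons x xs ih =>
    rw [pvSkipLt]
    rcases List.pairwise_cons.mp h with ⟨_, htl⟩
    by_cases hx : x < c
    · rw [if_pos hx]; exact ih htl
    · rw [if_neg hx]; exact h

theorem pv_skipLt_head_not_lt (c : Char) (a : List Char) (x : Char) (xs : List Char)
    (h : pvSkipLt c a = x :: xs) : ¬ x < c := by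
  induction a with
  | nil => simp [pvSkipLt] at h
  | cons y ys ih =>
    rw [pvSkipLt] at h
    by_cases hy : y < c
    · rw [if_pos hy] at h; exact ih h
    · rw [if_neg hy] at h
      cases h
      exact hy

-- dropping the elements < c does not change the intersection with a multiset
-- whose elements are all ≥ c
theorem pv_skipLt_inter (c : Char) (B : Multiset Char)
    (hB : ∀ y ∈ B, c ≤ y) (a : List Char) :
    ((a : Multiset Char) ∩ B) = ((pvSkipLt c a : Multiset Char) ∩ B) := by
  induction a with
  | nil => rfl
  | cons x xs ih =>
    rw [pvSkipLt]
    by_cases hx : x < c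
    · rw [if_pos hx, ← ih]
      have hxB : x ∉ B := fun hmem => absurd (hB x hmem) (not_le.mpr hx)
      rw [← Multiset.cons_coe]
      exact Multiset.cons_inter_of_neg _ hxB
    · rw [if_neg hx]

-- The two-pointer sweep over the sorted remainder b, started at suffix a with
-- matched count m, ends with matched = m + |a ∩ b| (multiset intersection).
theorem pv_merge (b : List Char) : ∀ (a : List Char) (m : Int),
    a.Pairwise (· ≤ ·) → b.Pairwise (· ≤ ·) →
    (b.foldl pvStep (a, m)).2
      = m + (((a : Multiset Char)) ∩ (b : Multiset Char)).card := by
  induction b with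
  | nil => intro a m _ _; simp
  | cons c bs ih =>
    intro a m ha hb
    rcases List.pairwise_cons.mp hb with ⟨hcb, hbs⟩
    have hBge : ∀ y ∈ ((c :: bs : List Char) : Multiset Char), c ≤ y := by
      intro y hy
      rcases Multiset.mem_coe.mp hy with hy'
      rcases List.mem_cons.mp hy' with h1 | h2
      · exact le_of_eq h1.symm
      · exact hcb y h2
    have hinter := pv_skipLt_inter c _ hBge a
    have hr_sorted := pv_skipLt_sorted c a ha
    simp only [List.foldl_cons]
    rcases hr : pvSkipLt c a with _ | ⟨x, xs⟩
    · -- pointer ran off the end: nothing in a matches c or anything later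
      rw [show pvStep (a, m) c = ([], m) by simp [pvStep, hr]]
      rw [ih [] m (by simp) hbs]
      rw [hinter, hr]
      simp
    · rw [hr] at hinter hr_sorted
      rcases List.pairwise_cons.mp hr_sorted with ⟨hxle, hxs⟩
      by_cases hx : x = c
      · subst hx
        rw [show pvStep (a, m) x = (xs, m + 1) by simp [pvStep, hr]]
        rw [ih xs (m + 1) hxs hbs]
        rw [hinter]
        have hkey : ((x :: xs : List Char) : Multiset Char) ∩ ((x :: bs : List Char) : Multiset Char)
            = x ::ₘ ((xs : Multiset Char) ∩ (bs : Multiset Char)) := by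
          rw [← Multiset.cons_coe, ← Multiset.cons_coe,
              Multiset.cons_inter_of_pos _ (Multiset.mem_cons_self x _),
              Multiset.erase_cons_head]
        rw [hkey, Multiset.card_cons]
        push_cast
        ring
      · have hcx : c < x := lt_of_le_of_ne (not_lt.mp (pv_skipLt_head_not_lt c a x xs hr)) (Ne.symm hx)
        rw [show pvStep (a, m) c = (x :: xs, m) by simp [pvStep, hr, hx]]
        have hcnot : c ∉ ((x :: xs : List Char) : Multiset Char) := by
          intro hmem
          rcases List.mem_cons.mp (Multiset.mem_coe.mp hmem) with h1 | h2
          · exact absurd h1.symm hx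
          · exact absurd (lt_of_lt_of_le hcx (hxle c h2)) (lt_irrefl c)
        have hkey : ((x :: xs : List Char) : Multiset Char) ∩ ((c :: bs : List Char) : Multiset Char)
            = ((x :: xs : List Char) : Multiset Char) ∩ (bs : Multiset Char) := by
          have h1 : ((c :: bs : List Char) : Multiset Char) = c ::ₘ (bs : Multiset Char) :=
            (Multiset.cons_coe c bs).symm
          rw [h1, Multiset.inter_comm, Multiset.cons_inter_of_neg _ hcnot, Multiset.inter_comm]
        rw [ih (x :: xs) m hr_sorted hbs, hinter, hkey]

-- sorting does not change the underlying multiset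
theorem pv_sorted_coe (l : List Char) :
    ((PySem.List.sorted l (fun x => x) false : List Char) : Multiset Char) = (l : Multiset Char) :=
  Multiset.coe_eq_coe.mpr (PySem.List.sorted_perm l (fun x => x) false)

-- B's closed form: len(t) - |s ∩ t|
theorem pv_solve_alt_inter (s t : String) :
    solve_alt s t
      = (t.toList.length : Int)
        - (((s.toList : Multiset Char)) ∩ (t.toList : Multiset Char)).card := by
  simp only [solve_alt]
  rw [pv_merge _ _ 0
        (by simpa using PySem.List.sorted_pairwise s.toList (fun x => x))
        (by simpa using PySem.List.sorted_pairwise t.toList (fun x => x))]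
  rw [pv_sorted_coe, pv_sorted_coe, PySem.Str.len_eq]
  ring

-- the arithmetic bridge: sum of positive residues = len t - |s ∩ t|
theorem pv_residue_eq (s t : List Char) :
    ∑ c ∈ t.toFinset, max 0 ((t.count c : Int) - (s.count c : Int))
      = (t.length : Int) - (((s : Multiset Char)) ∩ (t : Multiset Char)).card := by
  have hcard : ((((s : Multiset Char)) ∩ (t : Multiset Char)).card : Int)
      = ∑ c ∈ t.toFinset, (min (s.count c) (t.count c) : Int) := by
    have h1 : (((s : Multiset Char)) ∩ (t : Multiset Char)).card
        = ∑ c ∈ (((s : Multiset Char)) ∩ (t : Multiset Char)).toFinset,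
            (((s : Multiset Char)) ∩ (t : Multiset Char)).count c :=
      (Multiset.toFinset_sum_count_eq _).symm
    have hsub : (((s : Multiset Char)) ∩ (t : Multiset Char)).toFinset ⊆ t.toFinset := by
      intro x hx
      have hmem := Multiset.mem_toFinset.mp hx
      have := Multiset.mem_inter.mp hmem
      simpa [List.mem_toFinset] using this.2
    have h2 : ∑ c ∈ (((s : Multiset Char)) ∩ (t : Multiset Char)).toFinset,
            (((s : Multiset Char)) ∩ (t : Multiset Char)).count c
        = ∑ c ∈ t.toFinset, (((s : Multiset Char)) ∩ (t : Multiset Char)).count c := by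
      apply Finset.sum_subset hsub
      intro x _ hx
      rw [Multiset.count_eq_zero]
      intro hmem
      exact hx (Multiset.mem_toFinset.mpr hmem)
    rw [h1, h2]
    push_cast
    apply Finset.sum_congr rfl
    intro x _
    rw [Multiset.count_inter]
    push_cast [Multiset.coe_count]
    rfl
  have hlen : (t.length : Int) = ∑ c ∈ t.toFinset, (t.count c : Int) := by
    have h' : t.length = ∑ c ∈ t.toFinset, t.count c := by
      simp
    rw [h']
    push_cast
    rfl
  rw [hcard, hlen, ← Finset.sum_sub_distrib]
  apply Finset.sum_congr rfl
  intro x _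
  omega

-- ===== VERDICT (by name: the statement is the Claim_ definition above) =====
theorem solve_spec : Claim_equal_solve := by
  intro s t _
  unfold Spec_solve
  rw [pv_solve_alt_inter]
  show (t.toList.foldl _ (PySem.Dict.counter s.toList, 0)).2 = _
  rw [pv_loopA t.toList (PySem.Dict.counter s.toList) 0
        (by intro c; rw [PySem.Dict.getD_counter]; exact Int.natCast_nonneg _)]
  simp only [PySem.Dict.getD_counter, zero_add]
  exact pv_residue_eq s.toList t.toList
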